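-- pv_equiv track=rewrite | github.com/Mae-4815162342/AdventOfCode2023 | Day4/task2.py | count_copies
-- ===== SOURCE A (Python) =====
-- def count_match_in_card(card):
--   """Counts matches in a single card line"""
--   values = [ val for val in card.replace('\n', '').split(' ')[2:] if val !='']
--   index_of_separation = values.index("|")
--   ticket_numbers = values[:index_of_separation]
--   values = values[index_of_separation + 1:]
--   count = 0
--   for val in values:
--     if val in ticket_numbers:
--       count +=1
--   return count
--
-- def count_copies(cards):
--   """Counts the number of scratchcards generated with the rule"""
--   sum = 0
--   cards_number = {i + 1:1 for i in range(len(cards))}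
--   for i in range(len(cards)):
--     card = cards[i]
--     copies = cards_number[i + 1] if i + 1 in cards_number else 1
--     sum += copies
--     points = count_match_in_card(card)
--     for k in range(points):
--       num = i + k + 2
--       if num in cards_number:
--         cards_number[num] += 1 * copies
--   return sum
--
-- cards="""Card 1: 41 48 83 86 17 | 83 86  6 31 17  9 48 53
-- Card 2: 13 32 20 16 61 | 61 30 68 82 17 32 24 19
-- Card 3:  1 21 53 59 44 | 69 82 63 72 16 21 14  1
-- Card 4: 41 92 73 84 69 | 59 84 76 51 58  5 54 83
-- Card 5: 87 83 26 28 32 | 88 30 70 12 93 22 82 36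
-- Card 6: 31 18 13 56 72 | 74 77 10 23 35 67 36 11""".split('\n')
-- ===== SOURCE B (Python) =====
-- def count_match_in_card(card):
--   """Counts matches in a single card line"""
--   values = [ val for val in card.replace('\n', '').split(' ')[2:] if val !='']
--   index_of_separation = values.index("|")
--   ticket_numbers = values[:index_of_separation]
--   values = values[index_of_separation + 1:]
--   count = 0
--   for val in values:
--     if val in ticket_numbers:
--       count +=1
--   return count
--
-- def count_copies(cards):
--   """Counts the number of scratchcards generated with the rule"""
--   matches = [count_match_in_card(card) for card in cards]
--   totals = []
--   for j, _ in enumerate(matches):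
--     totals.append(1 + sum(t for i, t in enumerate(totals) if j - i <= matches[i]))
--   return sum(totals)
-- ===== Notes on version B (the rewrite author's own statement) =====
-- stated objective: alternative
-- what changed: A pushes each card's copy count forward into a dict of pending counts per card number; B instead computes each card's final total by gathering from the already-final totals of earlier cards whose match count reaches it, then sums the totals (scatter-to-future dict replaced by gather-from-past over a precomputed matches list).
import Mathlib
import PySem

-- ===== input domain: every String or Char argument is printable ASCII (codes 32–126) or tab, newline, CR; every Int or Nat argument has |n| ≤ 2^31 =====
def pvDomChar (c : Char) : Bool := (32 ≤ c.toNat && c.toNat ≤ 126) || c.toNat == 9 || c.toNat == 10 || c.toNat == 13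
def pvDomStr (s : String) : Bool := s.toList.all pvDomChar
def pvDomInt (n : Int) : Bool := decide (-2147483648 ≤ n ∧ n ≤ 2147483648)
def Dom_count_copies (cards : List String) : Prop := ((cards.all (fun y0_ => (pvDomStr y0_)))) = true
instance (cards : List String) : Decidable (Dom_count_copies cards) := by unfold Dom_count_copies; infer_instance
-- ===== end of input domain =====

-- B replaces A's forward dict of pending copy counts by a per-card gather over the already-final
-- totals of earlier cards (a different decomposition; same cost class).

-- ===== PORT A =====
-- shared helper (identical in Source A and Source B): none exactly where Python raises ValueError (no "|" token)
def count_match_in_card (card : String) : Option Int :=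
  let values := (PySem.List.slice ((PySem.Str.split? (PySem.Str.replace card "\n" "") " ").getD []) (some 2) none).filter (fun v => decide (v ≠ ""))
  match PySem.List.index? values "|" with
  | none => none
  | some index_of_separation =>
    let ticket_numbers := PySem.List.slice values none (some (index_of_separation : Int))
    let values2 := PySem.List.slice values (some ((index_of_separation : Int) + 1)) none
    some (values2.foldl (fun count val => if ticket_numbers.contains val then count + 1 else count) 0)

-- body of 'for k in range(points)': cards_number[num] += 1 * copies, guarded by 'num in cards_number'
def aInner (i copies : Int) (d : PySem.Dict Int Int) (k : Int) : PySem.Dict Int Int :=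
  let num := i + k + 2
  if d.contains num then d.modify num 0 (· + 1 * copies) else d

-- body of 'for i in range(len(cards))'
def aBody (cards : List String) (st : Int × PySem.Dict Int Int) (i : Int) : Int × PySem.Dict Int Int :=
  let card := PySem.List.pyGetD cards i ""
  let copies := if st.2.contains (i + 1) then st.2.getD (i + 1) 1 else 1
  let sum := st.1 + copies
  let points := (count_match_in_card card).getD 0
  let dct := (PySem.List.pyRange 0 points 1).foldl (aInner i copies) st.2
  (sum, dct)

def count_copies (cards : List String) : Int :=
  let cards_number := (PySem.List.pyRange 0 (PySem.List.len cards) 1).foldl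
    (fun d i => d.insert (i + 1) (1 : Int)) PySem.Dict.empty
  let res := (PySem.List.pyRange 0 (PySem.List.len cards) 1).foldl (aBody cards) (0, cards_number)
  res.1

-- ===== PORT B =====
-- summand of 'sum(t for i, t in enumerate(totals) if j - i <= matches[i])'
def bInner (marr : List Int) (j : Int) (s : Int) (it : Int × Int) : Int :=
  if j - it.1 ≤ PySem.List.pyGetD marr it.1 0 then s + it.2 else s

-- body of 'for j, _ in enumerate(matches)': totals.append(1 + gathered sum)
def bBody (marr : List Int) (totals : List Int) (jm : Int × Int) : List Int :=
  totals ++ [1 + (PySem.List.enumerate totals).foldl (bInner marr jm.1) 0]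

def count_copies_alt (cards : List String) : Int :=
  let marr := cards.map (fun card => (count_match_in_card card).getD 0)
  let totals := (PySem.List.enumerate marr).foldl (bBody marr) []
  totals.foldl (fun acc t => acc + t) 0

-- ===== PRECONDITION & SPEC =====
-- a card's tokens after A's parsing: replace('\n','').split(' ')[2:] without empty pieces
def pvTokens (card : String) : List String :=
  (PySem.List.slice ((PySem.Str.split? (PySem.Str.replace card "\n" "") " ").getD []) (some 2) none).filter (fun v => decide (v ≠ ""))

-- Pre_ excludes exactly the cards with no "|" separator among their tokens, where A's values.index("|") raises ValueError
def Pre_count_copies (cards : List String) : Prop := ∀ c ∈ cards, "|" ∈ pvTokens c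
instance (cards : List String) : Decidable (Pre_count_copies cards) := by unfold Pre_count_copies; infer_instance
def pvWitness_count_copies : List String := ["Card 1: 1 2 | 2 3", "Card 2: 5 6 | 1 5"]

def Spec_count_copies (cards : List String) (out : Int) : Prop := out = count_copies_alt cards
instance (cards : List String) (out : Int) : Decidable (Spec_count_copies cards out) := by unfold Spec_count_copies; infer_instance

-- ===== CLAIM (what is proved, stated in full; the proofs are below) =====
def Claim_equal_count_copies : Prop := ∀ (cards : List String), Dom_count_copies cards → Pre_count_copies cards → Spec_count_copies cards (count_copies cards)

-- ===== LEMMAS AND PROOFS =====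

-- the final total of card j: 1 plus the totals of the earlier cards that win a copy of it;
-- both programs compute the sum of these
def cS (ms : List Int) (j : Nat) : Int :=
  1 + ((List.range j).attach.map (fun i => if (j : Int) - (i.1 : Int) ≤ ms.getD i.1 0 then cS ms i.1 else 0)).sum
termination_by j
decreasing_by exact List.mem_range.mp i.2

theorem cS_eq (ms : List Int) (j : Nat) :
    cS ms j = 1 + ((List.range j).map (fun (i : Nat) => if (j : Int) - (i : Int) ≤ ms.getD i 0 then cS ms i else 0)).sum := by
  rw [cS]; simp

-- matches are counts, hence nonnegative
theorem count_match_nonneg (c : String) : 0 ≤ (count_match_in_card c).getD 0 := by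
  unfold count_match_in_card
  simp only []
  cases h : PySem.List.index? ((PySem.List.slice ((PySem.Str.split? (PySem.Str.replace c "\n" "") " ").getD []) (some 2) none).filter (fun v => decide (v ≠ ""))) "|" with
  | none => simp
  | some idx =>
    simp only [Option.getD_some]
    rw [PySem.List.foldl_if_add_one]
    positivity

-- ---- A side: dict invariant ----
theorem aInner_cases (i copies k : Int) (d : PySem.Dict Int Int) :
    aInner i copies d k = if d.contains (i + k + 2) then d.modify (i + k + 2) 0 (· + copies) else d := by
  simp [aInner, one_mul]

theorem aInner_keys (i copies : Int) (l : List Int) (d : PySem.Dict Int Int) :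
    (l.foldl (aInner i copies) d).keys = d.keys := by
  induction l generalizing d with
  | nil => rfl
  | cons k l ih =>
    rw [List.foldl_cons, ih, aInner_cases]
    split
    · rw [PySem.Dict.keys_modify, PySem.Dict.keys_insert_of_contains]; assumption
    · rfl

theorem contains_eq_of_keys_eq (d d' : PySem.Dict Int Int) (h : d.keys = d'.keys) (x : Int) :
    d.contains x = d'.contains x := by
  cases hb : d'.contains x
  · cases hb2 : d.contains x
    · rfl
    · exact absurd ((PySem.Dict.contains_iff_mem_keys d' x).mpr (h ▸ (PySem.Dict.contains_iff_mem_keys d x).mp hb2)) (by simp [hb])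
  · exact (PySem.Dict.contains_iff_mem_keys d x).mpr (h ▸ (PySem.Dict.contains_iff_mem_keys d' x).mp hb)

-- effect of A's inner fold on an arbitrary key
theorem aInner_getD (i copies : Int) (m : Nat) : ∀ (a : Int) (d : PySem.Dict Int Int) (x : Int),
    ((PySem.List.pyRange a (a + m) 1).foldl (aInner i copies) d).getD x 0 =
      if a ≤ x - i - 2 ∧ x - i - 2 < a + m ∧ d.contains x = true then d.getD x 0 + copies else d.getD x 0 := by
  induction m with
  | zero =>
    intro a d x
    rw [show a + (0:Nat) = a by simp, PySem.List.pyRange_one_eq_nil le_rfl]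
    simp only [List.foldl_nil]
    rw [if_neg (by omega)]
  | succ m ih =>
    intro a d x
    rw [PySem.List.pyRange_one_cons (by push_cast; omega), List.foldl_cons]
    rw [show a + ((m:Nat)+1:Nat) = (a+1) + (m:Nat) by push_cast; ring]
    rw [ih (a+1)]
    have hkeys : (aInner i copies d a).keys = d.keys := by
      rw [aInner_cases]; split
      · rw [PySem.Dict.keys_modify, PySem.Dict.keys_insert_of_contains]; assumption
      · rfl
    rw [contains_eq_of_keys_eq _ _ hkeys x]
    by_cases hx : x = i + a + 2
    · subst hx
      rw [if_neg (by omega)]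
      by_cases hcont : d.contains (i + a + 2) = true
      · rw [if_pos ⟨by omega, by omega, hcont⟩, aInner_cases, if_pos hcont, PySem.Dict.getD_modify_self]
      · rw [if_neg (by tauto), aInner_cases, if_neg (by simpa using hcont)]
    · have hgd : (aInner i copies d a).getD x 0 = d.getD x 0 := by
        rw [aInner_cases]; split
        · rw [PySem.Dict.getD_modify_of_ne _ _ _ (by omega)]
        · rfl
      rw [hgd]
      by_cases hcond : a + 1 ≤ x - i - 2 ∧ x - i - 2 < a + 1 + m ∧ d.contains x = true
      · rw [if_pos hcond, if_pos ⟨by omega, by omega, hcond.2.2⟩]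
      · rw [if_neg hcond, if_neg (by intro ⟨h1, h2, h3⟩; exact hcond ⟨by omega, by omega, h3⟩)]

-- new material

-- the key list of every dict state A reaches
def keysR (n : Nat) : List Int := (PySem.List.pyRange 0 (n : Int) 1).map (fun i => i + 1)

theorem keysR_nodup (n : Nat) : (keysR n).Nodup := (PySem.List.nodup_pyRange_one 0 n).map (fun a b h => by omega)

theorem mem_keysR (n : Nat) (x : Int) : x ∈ keysR n ↔ 1 ≤ x ∧ x ≤ (n : Int) := by
  unfold keysR
  simp only [List.mem_map, PySem.List.mem_pyRange_one]
  constructor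
  · rintro ⟨a, ⟨h1, h2⟩, rfl⟩; omega
  · intro ⟨h1, h2⟩; exact ⟨x - 1, ⟨by omega, by omega⟩, by omega⟩

theorem getD_one_eq_zero (d : PySem.Dict Int Int) (x : Int) (h : d.contains x = true) :
    d.getD x 1 = d.getD x 0 := by
  cases hg : d.get? x with
  | none => rw [PySem.Dict.get?_eq_none_iff_contains] at hg; rw [h] at hg; cases hg
  | some v => rw [PySem.Dict.getD_eq_get?_getD, PySem.Dict.getD_eq_get?_getD, hg]; rfl

-- value of key j+1 after the first i outer steps of A
def vD (ms : List Int) (i j : Nat) : Int :=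
  1 + ((List.range (min i j)).map (fun (i' : Nat) => if (j : Int) - (i' : Int) ≤ ms.getD i' 0 then cS ms i' else 0)).sum

theorem vD_self (ms : List Int) (i : Nat) : vD ms i i = cS ms i := by rw [vD, cS_eq, min_self]

-- A's outer-loop invariant
def InvA (ms : List Int) (i : Nat) (st : Int × PySem.Dict Int Int) : Prop :=
  st.1 = ((List.range i).map (cS ms)).sum ∧ st.2.keys = keysR ms.length ∧
    ∀ j : Nat, j < ms.length → st.2.getD ((j : Int) + 1) 0 = vD ms i j

theorem aBody_eq (cards : List String) (st : Int × PySem.Dict Int Int) (i : Int) :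
    aBody cards st i = (st.1 + (if st.2.contains (i + 1) then st.2.getD (i + 1) 1 else 1),
      (PySem.List.pyRange 0 ((count_match_in_card (PySem.List.pyGetD cards i "")).getD 0) 1).foldl
        (aInner i (if st.2.contains (i + 1) then st.2.getD (i + 1) 1 else 1)) st.2) := rfl

theorem aBody_step (cards : List String) (ms : List Int) (hms : ms = cards.map (fun c => (count_match_in_card c).getD 0))
    (i : Nat) (hi : i < ms.length) (st : Int × PySem.Dict Int Int) (h : InvA ms i st) :
    InvA ms (i + 1) (aBody cards st (i : Int)) := by
  obtain ⟨hsum, hkeys, hval⟩ := h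
  have hcont : st.2.contains ((i : Int) + 1) = true := by
    rw [PySem.Dict.contains_iff_mem_keys, hkeys, mem_keysR]; omega
  have hcop : (if st.2.contains ((i : Int) + 1) then st.2.getD ((i : Int) + 1) 1 else 1) = cS ms i := by
    rw [if_pos hcont, getD_one_eq_zero _ _ hcont, hval i hi, vD_self]
  have hpts : (count_match_in_card (PySem.List.pyGetD cards (i : Int) "")).getD 0 = ms.getD i 0 := by
    have hilen : i < cards.length := by rw [hms] at hi; simpa using hi
    rw [PySem.List.pyGetD_natCast, List.getD_eq_getElem _ _ hilen, hms]
    simp [List.getD, List.getElem?_map, List.getElem?_eq_getElem hilen]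
  have hnn : 0 ≤ ms.getD i 0 := by
    rw [← hpts]; exact count_match_nonneg _
  rw [aBody_eq, hcop, hpts]
  refine ⟨?_, ?_, ?_⟩
  · simp only []
    rw [hsum, List.range_succ, List.map_append, List.sum_append]
    simp
  · simp only []
    rw [aInner_keys, hkeys]
  · intro j hj
    simp only []
    rw [show ms.getD i 0 = (0:Int) + ((ms.getD i 0).toNat : Nat) by omega]
    rw [aInner_getD, hval j hj]
    have hcontj : st.2.contains ((j : Int) + 1) = true := by
      rw [PySem.Dict.contains_iff_mem_keys, hkeys, mem_keysR]; omega
    by_cases hij : i < j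
    · have hmin1 : min (i+1) j = i + 1 := by omega
      have hmin0 : min i j = i := by omega
      have hvsucc : vD ms (i+1) j = vD ms i j + (if (j : Int) - (i : Int) ≤ ms.getD i 0 then cS ms i else 0) := by
        rw [vD, vD, hmin1, hmin0, List.range_succ, List.map_append, List.sum_append]
        simp [add_assoc]
      rw [hvsucc]
      by_cases hcnd : (j : Int) - (i : Int) ≤ ms.getD i 0
      · rw [if_pos ⟨by omega, by omega, hcontj⟩, if_pos hcnd]
      · rw [if_neg (by intro ⟨h1, h2, _⟩; exact hcnd (by omega)), if_neg hcnd]; ring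
    · have : vD ms (i+1) j = vD ms i j := by
        rw [vD, vD, show min (i+1) j = min i j by omega]
      rw [this, if_neg (by intro ⟨h1, h2, _⟩; omega)]

theorem mainA (cards : List String) (ms : List Int) (hms : ms = cards.map (fun c => (count_match_in_card c).getD 0)) :
    ∀ (fuel k : Nat), ms.length - k = fuel → k ≤ ms.length → ∀ st : Int × PySem.Dict Int Int, InvA ms k st →
      ((PySem.List.pyRange (k : Int) (ms.length : Int) 1).foldl (aBody cards) st).1 =
        ((List.range ms.length).map (cS ms)).sum := by
  intro fuel
  induction fuel with
  | zero =>
    intro k hf hk st hinv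
    have hkn : k = ms.length := by omega
    subst hkn
    rw [PySem.List.pyRange_one_eq_nil le_rfl, List.foldl_nil, hinv.1]
  | succ f ih =>
    intro k hf hk st hinv
    have hklt : k < ms.length := by omega
    rw [PySem.List.pyRange_one_cons (by exact_mod_cast hklt), List.foldl_cons]
    have hstep := aBody_step cards ms hms k hklt st hinv
    rw [show (k : Int) + 1 = ((k + 1 : Nat) : Int) by push_cast; ring]
    exact ih (k + 1) (by omega) (by omega) _ hstep

theorem init_dict (n : Nat) :
    ((PySem.List.pyRange 0 (n : Int) 1).foldl (fun d i => d.insert (i + 1) (1 : Int)) PySem.Dict.empty).items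
      = (PySem.List.pyRange 0 (n : Int) 1).map (fun i => (i + 1, (1 : Int))) := by
  rw [PySem.Dict.items_foldl_insert_fresh _ _ _ _ (fun a _ => PySem.Dict.contains_empty _)
    ((PySem.List.nodup_pyRange_one 0 n).map (fun a b h => by omega))]
  rfl

theorem aEq (cards : List String) :
    count_copies cards = ((List.range ((cards.map (fun c => (count_match_in_card c).getD 0)).length)).map
      (cS (cards.map (fun c => (count_match_in_card c).getD 0)))).sum := by
  set ms := cards.map (fun c => (count_match_in_card c).getD 0) with hms
  have hlen : ms.length = cards.length := by simp [hms]
  unfold count_copies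
  simp only [PySem.List.len_eq]
  set D0 := (PySem.List.pyRange 0 ((cards.length : Nat) : Int) 1).foldl (fun d i => d.insert (i + 1) (1 : Int)) PySem.Dict.empty with hD0
  have hitems : D0.items = (PySem.List.pyRange 0 ((cards.length : Nat) : Int) 1).map (fun i => (i + 1, (1 : Int))) := init_dict cards.length
  have hkeys : D0.keys = keysR ms.length := by
    rw [show D0.keys = D0.items.map (·.1) from rfl, hitems, hlen, keysR, List.map_map]
    rfl
  have hnd : D0.keys.Nodup := by rw [hkeys]; exact keysR_nodup _
  have hinv : InvA ms 0 (0, D0) := by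
    refine ⟨by simp, hkeys, ?_⟩
    intro j hj
    have hmem : ((j : Int) + 1, (1 : Int)) ∈ D0.items := by
      rw [hitems]
      exact List.mem_map.mpr ⟨(j : Int), PySem.List.mem_pyRange_one.mpr ⟨by omega, by omega⟩, rfl⟩
    rw [PySem.Dict.getD_of_mem_items _ hmem hnd, vD]
    simp
  have := mainA cards ms hms (ms.length) 0 (by omega) (by omega) (0, D0) hinv
  rw [hlen] at this
  rw [show ((0:Nat):Int) = (0:Int) from rfl] at this
  rw [this, hlen]

-- ---- B side ----
theorem enum_map_range (f : Nat → Int) (k : Nat) :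
    PySem.List.enumerate ((List.range k).map f) 0 = (List.range k).map (fun (i : Nat) => ((i : Int), f i)) := by
  induction k with
  | zero => rfl
  | succ k ih =>
    rw [List.range_succ, List.map_append, List.map_append, PySem.List.enumerate_append, ih]
    simp [PySem.List.enumerate_cons]

theorem bBody_acc (ms : List Int) (k : Nat) (x : Int) :
    bBody ms ((List.range k).map (cS ms)) ((k : Int), x) = (List.range (k + 1)).map (cS ms) := by
  unfold bBody
  rw [enum_map_range, List.foldl_map]
  have hfe : ∀ (s : Int) (i : Nat), bInner ms (k : Int) s ((i : Int), cS ms i)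
      = s + (if (k : Int) - (i : Int) ≤ ms.getD i 0 then cS ms i else 0) := by
    intro s i
    unfold bInner
    simp only [PySem.List.pyGetD_natCast]
    split <;> simp
  calc (List.range k).map (cS ms) ++ [1 + List.foldl (fun (s : Int) (i : Nat) => bInner ms (k : Int) s ((i : Int), cS ms i)) 0 (List.range k)]
      = (List.range k).map (cS ms) ++ [cS ms k] := by
        rw [show (fun (s : Int) (i : Nat) => bInner ms (k : Int) s ((i : Int), cS ms i))
            = (fun (s : Int) (i : Nat) => s + (if (k : Int) - (i : Int) ≤ ms.getD i 0 then cS ms i else 0)) from funext fun s => funext fun i => hfe s i]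
        rw [PySem.List.foldl_add (g := fun (i : Nat) => if (k : Int) - (i : Int) ≤ ms.getD i 0 then cS ms i else 0)]
        rw [cS_eq]
        simp
    _ = (List.range (k + 1)).map (cS ms) := by rw [List.range_succ, List.map_append]; rfl

theorem mainB (ms : List Int) : ∀ (l : List Int) (k : Nat), l = ms.drop k → k ≤ ms.length →
    (PySem.List.enumerate l (k : Int)).foldl (bBody ms) ((List.range k).map (cS ms)) =
      (List.range ms.length).map (cS ms) := by
  intro l
  induction l with
  | nil =>
    intro k hd hk
    have : k = ms.length := by
      have := congrArg List.length hd
      simp at this; omega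
    subst this
    rfl
  | cons x l ih =>
    intro k hd hk
    rw [PySem.List.enumerate_cons, List.foldl_cons, bBody_acc]
    have hklt : k < ms.length := by
      have := congrArg List.length hd
      simp at this; omega
    have hd' : l = ms.drop (k + 1) := by
      have : ms.drop (k+1) = (ms.drop k).drop 1 := by rw [List.drop_drop]
      rw [this, ← hd]; rfl
    rw [show (k : Int) + 1 = ((k + 1 : Nat) : Int) by push_cast; ring]
    exact ih (k + 1) hd' (by omega)

theorem altEq' (ms : List Int) :
    List.foldl (fun acc t => acc + t) 0 (List.foldl (bBody ms) [] (PySem.List.enumerate ms 0)) =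
      ((List.range ms.length).map (cS ms)).sum := by
  have h0 := mainB ms ms 0 rfl (by omega)
  simp only [Nat.cast_zero, List.range_zero, List.map_nil] at h0
  rw [h0]
  rw [show (fun (acc t : Int) => acc + t) = (fun (acc : Int) (t : Int) => acc + id t) from rfl]
  rw [PySem.List.foldl_add (g := id)]
  simp

theorem altEqFull (cards : List String) :
    count_copies_alt cards = ((List.range ((cards.map (fun c => (count_match_in_card c).getD 0)).length)).map
      (cS (cards.map (fun c => (count_match_in_card c).getD 0)))).sum :=
  altEq' (cards.map (fun c => (count_match_in_card c).getD 0))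

-- ===== VERDICT (by name: the statement is the Claim_ definition above) =====
theorem count_copies_spec : Claim_equal_count_copies := by
  intro cards _ _
  unfold Spec_count_copies
  rw [aEq, altEqFull]
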